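-- pv_equiv track=rewrite | github.com/jrspotts/TCTOR_Radar | post_analysis/skillcalcs.py | generateRemainingHeader
-- ===== SOURCE A (Python) =====
-- def generateRemainingHeader(elementsList):
--
--     returnLists = []
--     for element in elementsList:
--         strElement = str(element)
--         returnLists.append(strElement+' NON TOR No Min,'+strElement+' TOR No Min,'+\
--                            strElement+' NON TOR Second Bin,'+strElement+' TOR Second Bin,'+\
--                            strElement+' NON TOR No Clusters,'+strElement+' TOR No Clusters,'+\
--                            strElement+' NON TOR Potential Clusters,'+strElement+' TOR Potential Clusters,'+\
--                            strElement+' NON TOR Beam Height,'+strElement+' TOR Beam Height,'+\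
--                            strElement+' NON TOR Used Second Bin,'+strElement+' TOR Used SecondBin')
--
--     return ','.join(returnLists)
-- ===== SOURCE B (Python) =====
-- SUFFIXES = [' NON TOR No Min', ' TOR No Min',
--             ' NON TOR Second Bin', ' TOR Second Bin',
--             ' NON TOR No Clusters', ' TOR No Clusters',
--             ' NON TOR Potential Clusters', ' TOR Potential Clusters',
--             ' NON TOR Beam Height', ' TOR Beam Height',
--             ' NON TOR Used Second Bin', ' TOR Used SecondBin']
--
--
-- def generateRemainingHeader(elementsList):
--     return ','.join(str(e) + s for e in elementsList for s in SUFFIXES)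
-- ===== Notes on version B (the rewrite author's own statement) =====
-- stated objective: simpler
-- what changed: Replaces the 24-literal inline concatenation per element with a constant suffix table and one flat nested-comprehension join over elements and suffixes.
import Mathlib
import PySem

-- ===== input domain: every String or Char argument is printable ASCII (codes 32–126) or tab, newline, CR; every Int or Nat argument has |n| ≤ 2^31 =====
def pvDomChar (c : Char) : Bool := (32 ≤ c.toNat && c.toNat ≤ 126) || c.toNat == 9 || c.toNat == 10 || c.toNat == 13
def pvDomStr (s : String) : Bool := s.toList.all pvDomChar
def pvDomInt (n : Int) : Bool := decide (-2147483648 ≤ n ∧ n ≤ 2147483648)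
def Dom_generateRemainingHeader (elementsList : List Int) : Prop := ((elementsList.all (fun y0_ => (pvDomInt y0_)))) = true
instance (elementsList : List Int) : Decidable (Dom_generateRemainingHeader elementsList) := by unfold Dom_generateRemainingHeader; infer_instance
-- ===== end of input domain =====

set_option maxRecDepth 8000

-- B replaces A's 24-literal inline concatenation per element with a constant
-- suffix table and one flat nested join over elements × suffixes ("simpler").

-- ===== PORT A =====
def generateRemainingHeader (elementsList : List Int) : String :=
  let returnLists : List String :=
    elementsList.foldl (fun returnLists element =>
      let strElement := PySem.Int.toStr element
      returnLists ++
        [strElement ++ " NON TOR No Min," ++ strElement ++ " TOR No Min," ++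
         strElement ++ " NON TOR Second Bin," ++ strElement ++ " TOR Second Bin," ++
         strElement ++ " NON TOR No Clusters," ++ strElement ++ " TOR No Clusters," ++
         strElement ++ " NON TOR Potential Clusters," ++ strElement ++ " TOR Potential Clusters," ++
         strElement ++ " NON TOR Beam Height," ++ strElement ++ " TOR Beam Height," ++
         strElement ++ " NON TOR Used Second Bin," ++ strElement ++ " TOR Used SecondBin"]) []
  PySem.Str.join "," returnLists

-- ===== PORT B =====
def pvSuffixes : List String :=
  [" NON TOR No Min", " TOR No Min",
   " NON TOR Second Bin", " TOR Second Bin",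
   " NON TOR No Clusters", " TOR No Clusters",
   " NON TOR Potential Clusters", " TOR Potential Clusters",
   " NON TOR Beam Height", " TOR Beam Height",
   " NON TOR Used Second Bin", " TOR Used SecondBin"]

def generateRemainingHeader_alt (elementsList : List Int) : String :=
  PySem.Str.join ","
    (elementsList.flatMap (fun e => pvSuffixes.map (fun s => PySem.Int.toStr e ++ s)))

-- ===== PRECONDITION & SPEC =====
def Spec_generateRemainingHeader (elementsList : List Int) (out : String) : Prop := out = generateRemainingHeader_alt elementsList
instance (elementsList : List Int) (out : String) : Decidable (Spec_generateRemainingHeader elementsList out) := by unfold Spec_generateRemainingHeader; infer_instance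

-- ===== CLAIM (what is proved, stated in full; the proofs are below) =====
def Claim_equal_generateRemainingHeader : Prop := ∀ (elementsList : List Int), Dom_generateRemainingHeader elementsList → Spec_generateRemainingHeader elementsList (generateRemainingHeader elementsList)

-- ===== LEMMAS AND PROOFS =====

-- one element's big A-string is the ","-join of its 12 labelled pieces
theorem pvPiece (s : String) :
    s ++ " NON TOR No Min," ++ s ++ " TOR No Min," ++
    s ++ " NON TOR Second Bin," ++ s ++ " TOR Second Bin," ++
    s ++ " NON TOR No Clusters," ++ s ++ " TOR No Clusters," ++
    s ++ " NON TOR Potential Clusters," ++ s ++ " TOR Potential Clusters," ++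
    s ++ " NON TOR Beam Height," ++ s ++ " TOR Beam Height," ++
    s ++ " NON TOR Used Second Bin," ++ s ++ " TOR Used SecondBin"
    = PySem.Str.join "," (pvSuffixes.map (fun suf => s ++ suf)) := by
  rw [← String.toList_inj]
  simp [pvSuffixes, PySem.Str.toList_join, PySem.Chars.join_cons_cons, PySem.Chars.join_singleton]

theorem pvJoinAppend (sep : List Char) (xs ys : List (List Char)) (hx : xs ≠ []) (hy : ys ≠ []) :
    PySem.Chars.join sep (xs ++ ys) = PySem.Chars.join sep xs ++ sep ++ PySem.Chars.join sep ys := by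
  induction xs with
  | nil => exact absurd rfl hx
  | cons a t ih =>
    cases t with
    | nil =>
      cases ys with
      | nil => exact absurd rfl hy
      | cons b u => simp [PySem.Chars.join_cons_cons, PySem.Chars.join_singleton]
    | cons b u =>
      have := ih (by simp)
      simp only [List.cons_append] at *
      rw [PySem.Chars.join_cons_cons, PySem.Chars.join_cons_cons, this]
      simp [List.append_assoc]

-- join of per-element joins = join of the flattened pieces (each block nonempty)
theorem pvJoinMapJoin (sep : List Char) (f : Int → List (List Char)) (hf : ∀ e, f e ≠ [])
    (l : List Int) :
    PySem.Chars.join sep (l.map (fun e => PySem.Chars.join sep (f e)))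
      = PySem.Chars.join sep (l.flatMap f) := by
  induction l with
  | nil => simp [PySem.Chars.join_nil]
  | cons e t ih =>
    cases t with
    | nil => simp [PySem.Chars.join_singleton]
    | cons b u =>
      have ht : ((b :: u).map (fun e => PySem.Chars.join sep (f e))) ≠ [] := by simp
      have hflat : ((b :: u).flatMap f) ≠ [] := by
        simp only [List.flatMap_cons]
        intro h
        exact hf b (List.append_eq_nil_iff.mp h).1
      calc PySem.Chars.join sep ((e :: b :: u).map (fun e => PySem.Chars.join sep (f e)))
          = PySem.Chars.join sep ([PySem.Chars.join sep (f e)] ++ (b :: u).map (fun e => PySem.Chars.join sep (f e))) := by simp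
        _ = PySem.Chars.join sep (f e) ++ sep ++ PySem.Chars.join sep ((b :: u).map (fun e => PySem.Chars.join sep (f e))) := by
              rw [pvJoinAppend sep _ _ (by simp) ht, PySem.Chars.join_singleton]
        _ = PySem.Chars.join sep (f e) ++ sep ++ PySem.Chars.join sep ((b :: u).flatMap f) := by rw [ih]
        _ = PySem.Chars.join sep (f e ++ (b :: u).flatMap f) := by
              rw [pvJoinAppend sep _ _ (hf e) hflat]
        _ = PySem.Chars.join sep ((e :: b :: u).flatMap f) := by simp

-- ===== VERDICT (by name: the statement is the Claim_ definition above) =====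
theorem generateRemainingHeader_spec : Claim_equal_generateRemainingHeader := by
  intro l _
  show generateRemainingHeader l = generateRemainingHeader_alt l
  unfold generateRemainingHeader generateRemainingHeader_alt
  rw [PySem.List.foldl_append_singleton_eq_map]
  simp only [List.nil_append]
  have hmap : l.map (fun element =>
      let strElement := PySem.Int.toStr element
      strElement ++ " NON TOR No Min," ++ strElement ++ " TOR No Min," ++
      strElement ++ " NON TOR Second Bin," ++ strElement ++ " TOR Second Bin," ++
      strElement ++ " NON TOR No Clusters," ++ strElement ++ " TOR No Clusters," ++
      strElement ++ " NON TOR Potential Clusters," ++ strElement ++ " TOR Potential Clusters," ++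
      strElement ++ " NON TOR Beam Height," ++ strElement ++ " TOR Beam Height," ++
      strElement ++ " NON TOR Used Second Bin," ++ strElement ++ " TOR Used SecondBin")
      = l.map (fun e => PySem.Str.join "," (pvSuffixes.map (fun suf => PySem.Int.toStr e ++ suf))) :=
    List.map_congr_left (fun e _ => pvPiece (PySem.Int.toStr e))
  rw [hmap, ← String.toList_inj]
  rw [PySem.Str.toList_join, PySem.Str.toList_join, List.map_map]
  have hcomp : (String.toList ∘ fun e => PySem.Str.join "," (pvSuffixes.map (fun suf => PySem.Int.toStr e ++ suf)))
      = fun e => PySem.Chars.join (",".toList) ((pvSuffixes.map (fun suf => PySem.Int.toStr e ++ suf)).map String.toList) := by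
    funext e; simp [PySem.Str.toList_join]
  rw [hcomp]
  have := pvJoinMapJoin (",".toList)
      (fun e => (pvSuffixes.map (fun suf => PySem.Int.toStr e ++ suf)).map String.toList)
      (by intro e; simp [pvSuffixes]) l
  rw [this]
  congr 1
  simp [pvSuffixes, List.map_flatMap]
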